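-- pv_equiv track=rewrite | github.com/PedroManoel22/Lista_de_exercicios | sobre_strings.py/ex_07.py | conta_vogais_espacos
-- ===== SOURCE A (Python) =====
-- def conta_vogais_espacos(frase):
--     vogais = ['a', 'e', 'i', 'o', 'u']
--     cont_vogais = 0
--     cont_espacos = 0
--
--     for letra in frase:
--         if letra in vogais:
--             cont_vogais += 1
--
--         if letra == ' ':
--             cont_espacos += 1
--     return (f'Existem {cont_espacos} espaços em branco na sua frase!\n'
--             f'Apareceram {cont_vogais} vogais na sua frase!')
-- ===== SOURCE B (Python) =====
-- def conta_vogais_espacos(frase):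
--     tallies = {}
--     for letra in frase:
--         tallies[letra] = tallies.get(letra, 0) + 1
--     cont_vogais = sum(tallies.get(v, 0) for v in 'aeiou')
--     cont_espacos = tallies.get(' ', 0)
--     return (f'Existem {cont_espacos} espaços em branco na sua frase!\n'
--             f'Apareceram {cont_vogais} vogais na sua frase!')
-- ===== Notes on version B (the rewrite author's own statement) =====
-- stated objective: alternative
-- what changed: Replaces the per-character two-branch scan with a tabulate-then-lookup shape: one pass builds a character frequency table, then the vowel count is a fixed aggregation over the five vowels and the space count a single lookup.
import Mathlib
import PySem

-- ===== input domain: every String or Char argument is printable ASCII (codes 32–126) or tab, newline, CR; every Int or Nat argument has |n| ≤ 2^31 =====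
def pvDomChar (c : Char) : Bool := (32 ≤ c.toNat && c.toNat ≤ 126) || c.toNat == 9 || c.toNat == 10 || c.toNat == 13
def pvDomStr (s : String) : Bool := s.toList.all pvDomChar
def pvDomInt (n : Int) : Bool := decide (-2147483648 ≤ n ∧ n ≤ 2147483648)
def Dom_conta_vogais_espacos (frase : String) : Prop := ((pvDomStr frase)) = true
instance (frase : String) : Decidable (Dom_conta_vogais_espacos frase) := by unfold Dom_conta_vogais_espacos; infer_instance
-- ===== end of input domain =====

-- B replaces A's per-character two-branch scan with a frequency table built once, then a fixed aggregation over 'aeiou' and a single lookup for ' ' (alternative decomposition, same cost).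


-- ===== PORT A =====
def conta_vogais_espacos (frase : String) : String :=
  let vogais : List Char := ['a', 'e', 'i', 'o', 'u']
  let counts : Int × Int :=
    frase.toList.foldl (fun (p : Int × Int) letra =>
      ((if vogais.contains letra then p.1 + 1 else p.1),
       (if letra == ' ' then p.2 + 1 else p.2))) (0, 0)
  "Existem " ++ PySem.Int.toStr counts.2 ++ " espaços em branco na sua frase!\n" ++
  "Apareceram " ++ PySem.Int.toStr counts.1 ++ " vogais na sua frase!"

-- ===== PORT B =====
def conta_vogais_espacos_alt (frase : String) : String :=
  let tallies : PySem.Dict Char Int :=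
    frase.toList.foldl (fun d letra => d.insert letra (d.getD letra 0 + 1)) PySem.Dict.empty
  let cont_vogais : Int :=
    (['a', 'e', 'i', 'o', 'u'] : List Char).foldl (fun s v => s + tallies.getD v 0) 0
  let cont_espacos : Int := tallies.getD ' ' 0
  "Existem " ++ PySem.Int.toStr cont_espacos ++ " espaços em branco na sua frase!\n" ++
  "Apareceram " ++ PySem.Int.toStr cont_vogais ++ " vogais na sua frase!"

-- ===== PRECONDITION & SPEC =====
def Spec_conta_vogais_espacos (frase : String) (out : String) : Prop := out = conta_vogais_espacos_alt frase
instance (frase : String) (out : String) : Decidable (Spec_conta_vogais_espacos frase out) := by unfold Spec_conta_vogais_espacos; infer_instance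

-- ===== CLAIM (what is proved, stated in full; the proofs are below) =====
def Claim_equal_conta_vogais_espacos : Prop := ∀ (frase : String), Dom_conta_vogais_espacos frase → Spec_conta_vogais_espacos frase (conta_vogais_espacos frase)

-- ===== LEMMAS AND PROOFS =====

-- A's paired fold equals (a + vowel countP, b + space count).
theorem pairFold_eq (l : List Char) (a b : Int) :
    l.foldl (fun (p : Int × Int) letra =>
      ((if (['a', 'e', 'i', 'o', 'u'] : List Char).contains letra then p.1 + 1 else p.1),
       (if letra == ' ' then p.2 + 1 else p.2))) (a, b)
      = (a + (l.countP (fun c => (['a', 'e', 'i', 'o', 'u'] : List Char).contains c) : Int),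
         b + (l.count ' ' : Int)) := by
  induction l generalizing a b with
  | nil => simp
  | cons c t ih =>
    simp only [List.foldl_cons, ih, List.countP_cons, List.count_cons]
    rw [Prod.mk.injEq]
    constructor <;> split_ifs with h <;> push_cast <;> ring

-- the vowel countP splits into the five individual counts (vowels are pairwise distinct)
theorem countP_vowels (l : List Char) :
    (l.countP (fun c => (['a', 'e', 'i', 'o', 'u'] : List Char).contains c) : Int)
      = (l.count 'a' : Int) + l.count 'e' + l.count 'i' + l.count 'o' + l.count 'u' := by
  induction l with
  | nil => simp
  | cons c t ih =>
    simp only [List.countP_cons, List.count_cons]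
    by_cases ha : c = 'a' <;> by_cases he : c = 'e' <;> by_cases hi : c = 'i' <;>
      by_cases ho : c = 'o' <;> by_cases hu : c = 'u' <;> simp_all <;> ring

-- ===== VERDICT (by name: the statement is the Claim_ definition above) =====
theorem conta_vogais_espacos_spec : Claim_equal_conta_vogais_espacos := by
  intro frase _
  unfold Spec_conta_vogais_espacos conta_vogais_espacos conta_vogais_espacos_alt
  simp only [pairFold_eq, PySem.Dict.getD_foldl_insert_add_one, PySem.Dict.getD_empty,
    List.foldl_cons, List.foldl_nil, countP_vowels]
  ring_nf
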